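-- pv_equiv track=rewrite | github.com/CCroyPerrett/Professional-Site | projects/Python-Executables/final.py | count_these_terms
-- ===== SOURCE A (Python) =====
-- def count_these_terms(list_of_terms, items_to_count):
--     '''
-- Takes two list as an input. Returns a dictionary showing how many times
-- each item in the second list appeared in the first list.
--     '''
--
--     counting_dictionary = {}
--
--     for item in items_to_count:
--         item_amount = 0
--         for term in list_of_terms:
--             if (item == term):
--                 item_amount += 1
--         counting_dictionary[item] = item_amount
--
--     return counting_dictionary
-- ===== SOURCE B (Python) =====
-- def count_these_terms(list_of_terms, items_to_count):
--     '''Single pass over list_of_terms with a pre-initialised accumulator dict.'''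
--     result = {item: 0 for item in items_to_count}
--     for term in list_of_terms:
--         if term in result:
--             result[term] += 1
--     return result
-- ===== Notes on version B (the rewrite author's own statement) =====
-- stated objective: faster
-- what changed: Inverted loop nesting: instead of scanning list_of_terms once per query item (nested loops), B initialises a zero dict over items_to_count and makes a single counting pass over list_of_terms with O(1) membership updates.
import Mathlib
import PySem

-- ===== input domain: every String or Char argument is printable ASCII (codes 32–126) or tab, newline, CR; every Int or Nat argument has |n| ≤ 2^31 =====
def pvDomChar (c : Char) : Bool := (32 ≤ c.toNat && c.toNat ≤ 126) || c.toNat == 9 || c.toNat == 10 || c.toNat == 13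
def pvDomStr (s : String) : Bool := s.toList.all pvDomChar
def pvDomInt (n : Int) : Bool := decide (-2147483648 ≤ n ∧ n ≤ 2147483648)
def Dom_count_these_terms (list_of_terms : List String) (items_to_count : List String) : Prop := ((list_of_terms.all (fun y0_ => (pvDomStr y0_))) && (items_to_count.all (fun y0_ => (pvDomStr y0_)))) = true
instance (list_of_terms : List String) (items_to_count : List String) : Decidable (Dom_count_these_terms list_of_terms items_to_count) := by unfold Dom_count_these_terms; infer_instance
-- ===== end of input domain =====

-- B inverts the loop nesting: one zero-initialised dict, then a single counting pass over
-- list_of_terms, instead of a full scan of list_of_terms per query item.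

-- ===== PORT A =====
def count_these_terms (list_of_terms : List String) (items_to_count : List String) : List (String × Int) :=
  (items_to_count.foldl
    (fun d item =>
      d.insert item
        (list_of_terms.foldl (fun item_amount term => if item == term then item_amount + 1 else item_amount) (0 : Int)))
    PySem.Dict.empty).items

-- ===== PORT B =====
def count_these_terms_alt (list_of_terms : List String) (items_to_count : List String) : List (String × Int) :=
  let result := items_to_count.foldl (fun d item => d.insert item (0 : Int)) PySem.Dict.empty
  (list_of_terms.foldl
    (fun d term => if d.contains term then d.insert term (d.getD term 0 + 1) else d)
    result).items

-- ===== PRECONDITION & SPEC =====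
def Spec_count_these_terms (list_of_terms : List String) (items_to_count : List String) (out : List (String × Int)) : Prop := out = count_these_terms_alt list_of_terms items_to_count
instance (list_of_terms : List String) (items_to_count : List String) (out : List (String × Int)) : Decidable (Spec_count_these_terms list_of_terms items_to_count out) := by unfold Spec_count_these_terms; infer_instance

-- ===== CLAIM (what is proved, stated in full; the proofs are below) =====
def Claim_equal_count_these_terms : Prop := ∀ (list_of_terms : List String) (items_to_count : List String), Dom_count_these_terms list_of_terms items_to_count → Spec_count_these_terms list_of_terms items_to_count (count_these_terms list_of_terms items_to_count)

-- ===== LEMMAS AND PROOFS =====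

-- A's loop: inserting, for each item, a value depending only on the item
theorem getD_foldl_insert_const {κ : Type} [BEq κ] [LawfulBEq κ] [DecidableEq κ]
    (items : List κ) (c : κ → Int) (d : PySem.Dict κ Int) (k : κ) :
    (items.foldl (fun d item => d.insert item (c item)) d).getD k 0
      = if k ∈ items then c k else d.getD k 0 := by
  induction items generalizing d with
  | nil => simp
  | cons x xs ih =>
    simp only [List.foldl_cons, ih, PySem.Dict.getD_insert, List.mem_cons]
    by_cases hk : k ∈ xs <;> by_cases hx : k = x <;> simp [hk, hx]

-- B's counting pass only touches existing keys, so it preserves the key list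
theorem keys_foldl_count {κ : Type} [BEq κ] [LawfulBEq κ]
    (l : List κ) (d : PySem.Dict κ Int) :
    (l.foldl (fun d t => if d.contains t then d.insert t (d.getD t 0 + 1) else d) d).keys = d.keys := by
  induction l generalizing d with
  | nil => rfl
  | cons t ts ih =>
    simp only [List.foldl_cons]
    by_cases h : d.contains t = true
    · simp only [h, if_true]
      rw [ih, PySem.Dict.keys_insert_of_contains d _ h]
    · simp only [Bool.not_eq_true] at h
      simp [h, ih]

-- B's counting pass: value at k grows by the count of k in l when k is a key
theorem getD_foldl_count {κ : Type} [BEq κ] [LawfulBEq κ] [DecidableEq κ]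
    (l : List κ) (d : PySem.Dict κ Int) (k : κ) :
    (l.foldl (fun d t => if d.contains t then d.insert t (d.getD t 0 + 1) else d) d).getD k 0
      = d.getD k 0 + (if d.contains k then (l.count k : Int) else 0) := by
  induction l generalizing d with
  | nil => simp
  | cons t ts ih =>
    simp only [List.foldl_cons]
    by_cases h : d.contains t = true
    · rw [if_pos h, ih, PySem.Dict.getD_insert, PySem.Dict.contains_insert]
      by_cases hk : k = t
      · subst hk
        simp only [BEq.rfl, Bool.true_or, h, List.count_cons]
        push_cast
        ring
      · have hbe : (k == t) = false := by simp [hk]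
        have hcnt : (t :: ts).count k = ts.count k := by simp [Ne.symm hk]
        simp [hbe, hk, hcnt]
    · rw [if_neg h, ih]
      by_cases hc : d.contains k = true
      · have hk : k ≠ t := fun e => h (e ▸ hc)
        have hcnt : (t :: ts).count k = ts.count k := by simp [Ne.symm hk]
        simp [hc, hcnt]
      · simp only [Bool.not_eq_true] at hc
        simp [hc]

-- the two loop results carry the same items list
theorem items_eq (list_of_terms items_to_count : List String) :
    (items_to_count.foldl
        (fun d item =>
          d.insert item
            (list_of_terms.foldl (fun a term => if item == term then a + 1 else a) (0 : Int)))
        PySem.Dict.empty).items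
      = (list_of_terms.foldl
          (fun d t => if d.contains t then d.insert t (d.getD t 0 + 1) else d)
          (items_to_count.foldl (fun d item => d.insert item (0 : Int)) PySem.Dict.empty)).items := by
  set dA := items_to_count.foldl
      (fun d item =>
        d.insert item
          (list_of_terms.foldl (fun a term => if item == term then a + 1 else a) (0 : Int)))
      PySem.Dict.empty with hdA
  set d0 := items_to_count.foldl (fun d item => d.insert item (0 : Int)) PySem.Dict.empty with hd0
  set dB := list_of_terms.foldl
      (fun d t => if d.contains t then d.insert t (d.getD t 0 + 1) else d) d0 with hdB
  have hkA : dA.keys = PySem.Set.ofList items_to_count := by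
    rw [hdA, PySem.Dict.keys_foldl_insert, PySem.Dict.keys_empty, PySem.Set.update_nil_left]
  have hk0 : d0.keys = PySem.Set.ofList items_to_count := by
    rw [hd0, PySem.Dict.keys_foldl_insert, PySem.Dict.keys_empty, PySem.Set.update_nil_left]
  have hkB : dB.keys = PySem.Set.ofList items_to_count := by
    rw [hdB, keys_foldl_count, hk0]
  have hndA : dA.keys.Nodup := by
    rw [hkA]; exact PySem.Set.nodup_ofList _
  have hndB : dB.keys.Nodup := by
    rw [hkB]; exact PySem.Set.nodup_ofList _
  rw [PySem.Dict.items_eq_map_keys dA hndA 0, PySem.Dict.items_eq_map_keys dB hndB 0, hkA, hkB]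
  apply List.map_congr_left
  intro k hk
  have hkmem : k ∈ items_to_count := (PySem.Set.mem_ofList _ _).mp hk
  have hA : dA.getD k 0 = (list_of_terms.count k : Int) := by
    rw [hdA, getD_foldl_insert_const, if_pos hkmem,
        PySem.List.foldl_count_if (fun term => k == term) list_of_terms 0]
    simp only [List.count, zero_add, Nat.cast_inj]
    exact List.countP_congr (fun a _ => ⟨fun h => by simp [eq_of_beq h], fun h => by simp [eq_of_beq h]⟩)
  have h0c : d0.contains k = true := by
    rw [PySem.Dict.contains_iff_mem_keys, hk0]
    exact hk
  have h00 : d0.getD k 0 = 0 := by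
    rw [hd0, getD_foldl_insert_const]
    simp [hkmem]
  have hB : dB.getD k 0 = (list_of_terms.count k : Int) := by
    rw [hdB, getD_foldl_count, h00, h0c, if_pos rfl, zero_add]
  rw [hA, hB]

-- ===== VERDICT (by name: the statement is the Claim_ definition above) =====
theorem count_these_terms_spec : Claim_equal_count_these_terms := by
  intro list_of_terms items_to_count _
  unfold Spec_count_these_terms count_these_terms count_these_terms_alt
  exact items_eq list_of_terms items_to_count
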